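-- pv_equiv track=rewrite | github.com/crowninda/rover-vision | rover_vision/navigation.py | highest_number_occurrences
-- ===== SOURCE A (Python) =====
-- def highest_number_occurrences(temp: list) -> list:
--     '''
--     compare the records from 3 rounds of to-and-fro scanning, with each scan yielding 10 sets of data
--
--     Args:
--         temp:  obstacle coordinate data recorded from 3 rounds of back-and-forth scanning
--
--     Returns:
--         final_ans: the most frequently occurring data in each set
--     '''
--     same_index = [] # coordinate information of the same angle in different scans
--     final_ans = [] # final data obtained after comparison
--     for i in range(len(temp[0])):
--         for j in range(len(temp)):
--             same_index.append(temp[j][i])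
--         compare_max = max(same_index, key = same_index.count)
--         final_ans.append(compare_max)
--         same_index = []
--     return final_ans
-- ===== SOURCE B (Python) =====
-- def highest_number_occurrences(temp: list) -> list:
--     ''' Per-column mode: build one counter per column in a single row-major pass,
--         then pick each counter's first-inserted key of maximal count. '''
--     ncols = len(temp[0])
--     counts = [{} for _ in range(ncols)]
--     for row in temp:
--         for i in range(ncols):
--             v = row[i]
--             c = counts[i]
--             c[v] = c.get(v, 0) + 1
--     final_ans = []
--     for c in counts:
--         best, best_n = 0, 0
--         for k, n in c.items():
--             if n > best_n:
--                 best, best_n = k, n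
--         final_ans.append(best)
--     return final_ans
-- ===== Notes on version B (the rewrite author's own statement) =====
-- stated objective: faster
-- what changed: Instead of re-collecting each column and calling max(col, key=col.count) (which rescans the column for every element), B builds one frequency dict per column in a single row-major pass and then, in a separate pass, extracts each column's first-inserted key of maximal count.
-- outside the precondition, e.g. on highest_number_occurrences([]): A raises IndexError, B raises IndexError
import Mathlib
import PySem

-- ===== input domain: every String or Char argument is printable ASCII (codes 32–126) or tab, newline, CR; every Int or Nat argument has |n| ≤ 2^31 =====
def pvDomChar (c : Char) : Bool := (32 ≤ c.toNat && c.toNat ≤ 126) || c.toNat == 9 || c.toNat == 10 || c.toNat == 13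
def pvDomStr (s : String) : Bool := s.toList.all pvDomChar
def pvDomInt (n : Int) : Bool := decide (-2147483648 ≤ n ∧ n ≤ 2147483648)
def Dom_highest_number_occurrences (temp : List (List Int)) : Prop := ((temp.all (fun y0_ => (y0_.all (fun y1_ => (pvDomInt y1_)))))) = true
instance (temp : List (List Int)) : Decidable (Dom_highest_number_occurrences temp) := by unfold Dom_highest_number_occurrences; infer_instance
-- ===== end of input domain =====

-- B replaces A's per-column max(col, key=col.count) rescans by one row-major counting pass over
-- frequency dicts plus a separate argmax-extraction pass (objective: faster).


-- ===== PORT A =====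
def highest_number_occurrences (temp : List (List Int)) : List Int :=
  -- temp[0] is ported as pyGetD temp 0 []; the default is only reached outside Pre_ (temp = [],
  -- where Python raises IndexError), likewise pyGetD for temp[j][i] and the .getD 0 after max
  -- (max of an empty list raises ValueError; here same_index has length len(temp) ≥ 1 inside Pre_).
  (PySem.List.pyRange 0 (PySem.List.len (PySem.List.pyGetD temp 0 []))).foldl
    (fun final_ans i =>
      let same_index : List Int :=
        (PySem.List.pyRange 0 (PySem.List.len temp)).foldl
          (fun acc j => acc ++ [PySem.List.pyGetD (PySem.List.pyGetD temp j []) i 0]) []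
      let compare_max := (PySem.List.max? same_index (fun x => (same_index.count x : Int))).getD 0
      final_ans ++ [compare_max]) []

-- ===== PORT B =====
-- range(ncols) over the Nat ncols is ported as List.range ncols (exact: ncols = len(temp[0]) ≥ 0);
-- row[i] is pyGetD row ↑i 0 (default unreachable inside Pre_); c[v] = c.get(v, 0) + 1 is Dict.insert.
def highest_number_occurrences_alt (temp : List (List Int)) : List Int :=
  let ncols := (PySem.List.pyGetD temp 0 []).length
  let counts :=
    temp.foldl
      (fun counts row =>
        (List.range ncols).foldl
          (fun counts i =>
            counts.set i
              ((counts.getD i PySem.Dict.empty).insert (PySem.List.pyGetD row (i : Int) 0)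
                ((counts.getD i PySem.Dict.empty).getD (PySem.List.pyGetD row (i : Int) 0) 0 + 1)))
          counts)
      (List.replicate ncols PySem.Dict.empty)
  counts.foldl
    (fun final_ans c =>
      let best := c.items.foldl
        (fun (p : Int × Int) (kn : Int × Int) => if p.2 < kn.2 then kn else p) ((0 : Int), (0 : Int))
      final_ans ++ [best.1]) []

-- ===== PRECONDITION & SPEC =====
-- Pre_ excludes exactly the inputs on which the Python A raises: temp = [] (temp[0] is an
-- IndexError) and ragged inputs with some row shorter than temp[0] (temp[j][i] is an IndexError).
def Pre_highest_number_occurrences (temp : List (List Int)) : Prop :=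
  temp ≠ [] ∧ ∀ row ∈ temp, (temp.headD []).length ≤ row.length
instance (temp : List (List Int)) : Decidable (Pre_highest_number_occurrences temp) := by
  unfold Pre_highest_number_occurrences; infer_instance

def pvWitness_highest_number_occurrences : List (List Int) := [[1, 2], [1, 3], [2, 3]]

def Spec_highest_number_occurrences (temp : List (List Int)) (out : List Int) : Prop := out = highest_number_occurrences_alt temp
instance (temp : List (List Int)) (out : List Int) : Decidable (Spec_highest_number_occurrences temp out) := by unfold Spec_highest_number_occurrences; infer_instance

-- ===== CLAIM (what is proved, stated in full; the proofs are below) =====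
def Claim_equal_highest_number_occurrences : Prop := ∀ (temp : List (List Int)), Dom_highest_number_occurrences temp → Pre_highest_number_occurrences temp → Spec_highest_number_occurrences temp (highest_number_occurrences temp)


-- ===== LEMMAS AND PROOFS =====

-- the step of Python's max(xs, key): keep the current best, replace on a strictly larger key
def pvMstep (key : Int → Int) (acc : Option Int) (x : Int) : Option Int :=
  match acc with
  | none => some x
  | some m => if key m < key x then some x else some m

-- running max with a fixed first candidate
def pvRunmax (key : Int → Int) (m : Int) (l : List Int) : Int :=
  l.foldl (fun m x => if key m < key x then x else m) m

theorem pvMax?_eq_foldl (xs : List Int) (key : Int → Int) :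
    PySem.List.max? xs key = xs.foldl (pvMstep key) none := by
  unfold PySem.List.max?
  congr 1
  funext acc x
  cases acc <;> rfl

theorem pvMax?_append (l : List Int) (x : Int) (key : Int → Int) :
    PySem.List.max? (l ++ [x]) key = pvMstep key (PySem.List.max? l key) x := by
  rw [pvMax?_eq_foldl, pvMax?_eq_foldl, List.foldl_append, List.foldl_cons, List.foldl_nil]

theorem pvFoldl_mstep_some (key : Int → Int) (l : List Int) :
    ∀ m, l.foldl (pvMstep key) (some m) = some (pvRunmax key m l) := by
  induction l with
  | nil => intro m; rfl
  | cons x t ih =>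
      intro m
      simp only [List.foldl_cons, pvMstep, pvRunmax]
      by_cases h : key m < key x
      · simp only [if_pos h]; exact ih x
      · simp only [if_neg h]; exact ih m

theorem pvMax?_cons (key : Int → Int) (x : Int) (t : List Int) :
    PySem.List.max? (x :: t) key = some (pvRunmax key x t) := by
  rw [pvMax?_eq_foldl]
  simp only [List.foldl_cons, pvMstep]
  exact pvFoldl_mstep_some key t x

-- later duplicates never improve the running max, so max? ignores them
theorem pvMax?_ofList (key : Int → Int) (l : List Int) :
    PySem.List.max? (PySem.Set.ofList l) key = PySem.List.max? l key := by
  induction l using List.reverseRecOn with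
  | nil => rfl
  | append_singleton l x ih =>
      rw [PySem.Set.ofList_append_singleton, pvMax?_append]
      by_cases hx : x ∈ l
      · rw [PySem.Set.add_of_mem (by rw [PySem.Set.mem_ofList]; exact hx)]
        have hne : PySem.Set.ofList l ≠ [] := by
          intro h
          have := (PySem.Set.mem_ofList l x).mpr hx
          rw [h] at this
          exact absurd this (List.not_mem_nil)
        obtain ⟨m, hm⟩ : ∃ m, PySem.List.max? (PySem.Set.ofList l) key = some m := by
          cases h : PySem.List.max? (PySem.Set.ofList l) key with
          | none => exact absurd ((PySem.List.max?_eq_none_iff _ _).mp h) hne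
          | some m => exact ⟨m, rfl⟩
        have hle : key x ≤ key m :=
          PySem.List.max?_isMax hm x ((PySem.Set.mem_ofList l x).mpr hx)
        rw [hm, ← ih, hm]
        simp [pvMstep, not_lt.mpr hle]
      · rw [PySem.Set.add_of_not_mem (by rw [PySem.Set.mem_ofList]; exact hx)]
        rw [pvMax?_append, ih]

-- B's (best, best_n) scan mirrors the running max once both are seeded with a real element
theorem pvPairfold (key : Int → Int) (d : List Int) :
    ∀ m, (d.map (fun k => (k, key k))).foldl
        (fun (p : Int × Int) (kn : Int × Int) => if p.2 < kn.2 then kn else p) (m, key m)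
      = (pvRunmax key m d, key (pvRunmax key m d)) := by
  induction d with
  | nil => intro m; rfl
  | cons k t ih =>
      intro m
      simp only [List.map_cons, List.foldl_cons, pvRunmax]
      by_cases h : key m < key k
      · simp only [if_pos h]; exact ih k
      · simp only [if_neg h]; exact ih m

-- extraction from the column's counter = Python's max(col, key=col.count)
theorem pvExtract_eq (col : List Int) (hne : col ≠ []) :
    ((PySem.Dict.counter col).items.foldl
        (fun (p : Int × Int) (kn : Int × Int) => if p.2 < kn.2 then kn else p) ((0 : Int), (0 : Int))).1
      = (PySem.List.max? col (fun x => (col.count x : Int))).getD 0 := by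
  set key : Int → Int := fun x => (col.count x : Int) with hkey
  rw [PySem.Dict.items_counter]
  have hofne : PySem.Set.ofList col ≠ [] := by
    obtain ⟨c, t, rfl⟩ := List.exists_cons_of_ne_nil hne
    rw [PySem.Set.ofList_cons]; simp
  obtain ⟨k0, rest, hof⟩ := List.exists_cons_of_ne_nil hofne
  have hk0mem : k0 ∈ col := (PySem.Set.mem_ofList col k0).mp (hof ▸ List.mem_cons_self)
  have hpos : (0 : Int) < key k0 := by
    have : 0 < col.count k0 := List.count_pos_iff.mpr hk0mem
    simpa [hkey] using Int.natCast_pos.mpr this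
  have hmapeq : (fun k => (k, (List.count k col : Int))) = fun k => (k, key k) := by
    funext k; simp [hkey, List.count]
  rw [hmapeq, hof, List.map_cons, List.foldl_cons]
  simp only [if_pos hpos]
  rw [pvPairfold key rest k0]
  rw [← pvMax?_ofList key col, hof, pvMax?_cons]
  rfl

-- the per-index update loop leaves the length unchanged …
theorem pvFoldl_set_length {δ : Type} (G : List δ → Nat → δ) (l : List Nat) :
    ∀ cs : List δ, (l.foldl (fun cs i => cs.set i (G cs i)) cs).length = cs.length := by
  induction l with
  | nil => intro cs; rfl
  | cons i t ih => intro cs; rw [List.foldl_cons, ih]; exact List.length_set ..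

-- … and acts pointwise: index k < n becomes F k (old value), other indices keep their value
theorem pvInner_getD {δ : Type} (e : δ) (F : Nat → δ → δ) :
    ∀ (n : Nat) (cs : List δ), n ≤ cs.length → ∀ k,
      ((List.range n).foldl (fun cs i => cs.set i (F i (cs.getD i e))) cs).getD k e
        = if k < n then F k (cs.getD k e) else cs.getD k e := by
  intro n
  induction n with
  | zero => intro cs _ k; simp
  | succ n ih =>
      intro cs hn k
      rw [List.range_succ, List.foldl_append, List.foldl_cons, List.foldl_nil]
      set cs' := (List.range n).foldl (fun cs i => cs.set i (F i (cs.getD i e))) cs with hcs'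
      have hlen : cs'.length = cs.length := pvFoldl_set_length _ _ cs
      have hget : ∀ k, cs'.getD k e = if k < n then F k (cs.getD k e) else cs.getD k e :=
        ih cs (Nat.le_of_succ_le hn)
      have hgn : cs'.getD n e = cs.getD n e := by rw [hget n, if_neg (lt_irrefl n)]
      rw [List.getD_eq_getElem?_getD, List.getElem?_set]
      by_cases hkn : n = k
      · subst hkn
        rw [if_pos rfl, if_pos (by omega : n < cs'.length)]
        simp only [Option.getD_some]
        rw [hgn, if_pos (Nat.lt_succ_self n)]
      · rw [if_neg hkn, ← List.getD_eq_getElem?_getD, hget k]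
        by_cases hk : k < n
        · rw [if_pos hk, if_pos (by omega)]
        · rw [if_neg hk, if_neg (by omega)]

-- the row-major double loop of B, concretely; its length is invariant …
theorem pvOuter_length (N : Nat) (rows : List (List Int)) :
    ∀ cs : List (PySem.Dict Int Int),
      (rows.foldl
        (fun cs row =>
          (List.range N).foldl
            (fun cs i =>
              cs.set i
                ((cs.getD i PySem.Dict.empty).insert (PySem.List.pyGetD row (i : Int) 0)
                  ((cs.getD i PySem.Dict.empty).getD (PySem.List.pyGetD row (i : Int) 0) 0 + 1)))
            cs)
        cs).length = cs.length := by
  induction rows with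
  | nil => intro cs; rfl
  | cons r rs ih =>
      intro cs
      rw [List.foldl_cons, ih]
      exact pvFoldl_set_length
        (fun cs i =>
          (cs.getD i PySem.Dict.empty).insert (PySem.List.pyGetD r (i : Int) 0)
            ((cs.getD i PySem.Dict.empty).getD (PySem.List.pyGetD r (i : Int) 0) 0 + 1)) _ cs

-- … and slot k of the result is the fold of column k's values alone (loop interchange)
theorem pvOuter_getD (N : Nat) (rows : List (List Int)) :
    ∀ cs : List (PySem.Dict Int Int), cs.length = N → ∀ k, k < N →
      (rows.foldl
          (fun cs row =>
            (List.range N).foldl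
              (fun cs i =>
                cs.set i
                  ((cs.getD i PySem.Dict.empty).insert (PySem.List.pyGetD row (i : Int) 0)
                    ((cs.getD i PySem.Dict.empty).getD (PySem.List.pyGetD row (i : Int) 0) 0 + 1)))
              cs)
          cs).getD k PySem.Dict.empty
        = rows.foldl
            (fun d row =>
              d.insert (PySem.List.pyGetD row (k : Int) 0)
                (d.getD (PySem.List.pyGetD row (k : Int) 0) 0 + 1))
            (cs.getD k PySem.Dict.empty) := by
  induction rows with
  | nil => intro cs _ k _; rfl
  | cons r rs ih =>
      intro cs hlen k hk
      rw [List.foldl_cons, List.foldl_cons]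
      have hlen' :
          ((List.range N).foldl
            (fun cs i =>
              cs.set i
                ((cs.getD i PySem.Dict.empty).insert (PySem.List.pyGetD r (i : Int) 0)
                  ((cs.getD i PySem.Dict.empty).getD (PySem.List.pyGetD r (i : Int) 0) 0 + 1)))
            cs).length = N := by
        rw [pvFoldl_set_length
          (fun cs i =>
            (cs.getD i PySem.Dict.empty).insert (PySem.List.pyGetD r (i : Int) 0)
              ((cs.getD i PySem.Dict.empty).getD (PySem.List.pyGetD r (i : Int) 0) 0 + 1))]
        exact hlen
      rw [ih _ hlen' k hk]
      congr 1
      have := pvInner_getD PySem.Dict.empty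
        (fun i d =>
          d.insert (PySem.List.pyGetD r (i : Int) 0)
            (d.getD (PySem.List.pyGetD r (i : Int) 0) 0 + 1)) N cs (le_of_eq hlen.symm) k
      rw [this, if_pos hk]

theorem pvPyRange_cast (n : Nat) :
    PySem.List.pyRange 0 (n : Int) = (List.range n).map (fun (k : Nat) => (k : Int)) := by
  rw [PySem.List.pyRange_zero_natCast]

theorem highest_number_occurrences_eq_map (temp : List (List Int)) :
    highest_number_occurrences temp
      = (List.range (PySem.List.pyGetD temp 0 []).length).map
          (fun (k : Nat) =>
            let col := temp.map (fun row => PySem.List.pyGetD row (k : Int) 0)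
            (PySem.List.max? col (fun x => (col.count x : Int))).getD 0) := by
  unfold highest_number_occurrences
  have hcol : ∀ i : Int,
      ((PySem.List.pyRange 0 (PySem.List.len temp)).foldl
          (fun acc j => acc ++ [PySem.List.pyGetD (PySem.List.pyGetD temp j []) i 0]) [])
        = temp.map (fun row => PySem.List.pyGetD row i 0) := by
    intro i
    rw [PySem.List.foldl_append_singleton_eq_map
      (fun j => PySem.List.pyGetD (PySem.List.pyGetD temp j []) i 0)]
    rw [List.nil_append]
    rw [show (fun j => PySem.List.pyGetD (PySem.List.pyGetD temp j []) i 0)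
        = (fun row => PySem.List.pyGetD row i 0) ∘ (fun j => PySem.List.pyGetD temp j []) from rfl]
    rw [← List.map_map, PySem.List.map_pyGetD_pyRange_zero temp []]
  have hlen : PySem.List.len (PySem.List.pyGetD temp 0 [])
      = ((PySem.List.pyGetD temp 0 []).length : Int) := rfl
  rw [hlen, pvPyRange_cast]
  rw [PySem.List.foldl_append_singleton_eq_map
    (fun i =>
      let same_index := (PySem.List.pyRange 0 (PySem.List.len temp)).foldl
        (fun acc j => acc ++ [PySem.List.pyGetD (PySem.List.pyGetD temp j []) i 0]) []
      (PySem.List.max? same_index (fun x => (same_index.count x : Int))).getD 0)]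
  rw [List.nil_append, List.map_map]
  refine List.map_congr_left ?_
  intro k _
  simp only [Function.comp]
  rw [hcol (k : Int)]

theorem highest_number_occurrences_alt_eq_map (temp : List (List Int)) :
    highest_number_occurrences_alt temp
      = (List.range (PySem.List.pyGetD temp 0 []).length).map
          (fun (k : Nat) =>
            ((PySem.Dict.counter (temp.map (fun row => PySem.List.pyGetD row (k : Int) 0))).items.foldl
              (fun (p : Int × Int) (kn : Int × Int) => if p.2 < kn.2 then kn else p)
              ((0 : Int), (0 : Int))).1) := by
  unfold highest_number_occurrences_alt
  simp only []
  rw [PySem.List.foldl_append_singleton_eq_map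
    (fun c : PySem.Dict Int Int =>
      (c.items.foldl (fun (p : Int × Int) (kn : Int × Int) => if p.2 < kn.2 then kn else p)
        ((0 : Int), (0 : Int))).1)]
  rw [List.nil_append]
  have hlist :
      temp.foldl
        (fun counts row =>
          (List.range (PySem.List.pyGetD temp 0 []).length).foldl
            (fun counts i =>
              counts.set i
                ((counts.getD i PySem.Dict.empty).insert (PySem.List.pyGetD row (i : Int) 0)
                  ((counts.getD i PySem.Dict.empty).getD (PySem.List.pyGetD row (i : Int) 0) 0 + 1)))
            counts)
        (List.replicate (PySem.List.pyGetD temp 0 []).length PySem.Dict.empty)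
      = (List.range (PySem.List.pyGetD temp 0 []).length).map
          (fun (k : Nat) => PySem.Dict.counter (temp.map (fun row => PySem.List.pyGetD row (k : Int) 0))) := by
    apply List.ext_getElem
    · rw [pvOuter_length, List.length_replicate, List.length_map, List.length_range]
    · intro k hk1 hk2
      have hkN : k < (PySem.List.pyGetD temp 0 []).length := by
        rw [pvOuter_length, List.length_replicate] at hk1
        exact hk1
      rw [List.getElem_map, List.getElem_range]
      rw [← List.getD_eq_getElem _ PySem.Dict.empty hk1]
      rw [pvOuter_getD _ temp _ (List.length_replicate ..) k hkN]
      have hrep : (List.replicate (PySem.List.pyGetD temp 0 []).length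
            (PySem.Dict.empty : PySem.Dict Int Int)).getD k PySem.Dict.empty
          = PySem.Dict.empty := by
        rw [List.getD_eq_getElem?_getD, List.getElem?_replicate]
        by_cases h : k < (PySem.List.pyGetD temp 0 []).length <;> simp [h]
      rw [hrep]
      have hfm := (List.foldl_map (f := fun row => PySem.List.pyGetD row (k : Int) 0)
        (g := fun (d : PySem.Dict Int Int) (v : Int) => d.insert v (d.getD v 0 + 1))
        (l := temp) (init := PySem.Dict.empty)).symm
      exact hfm.trans (PySem.Dict.foldl_insert_getD_add_one_eq_counter _)
  rw [hlist, List.map_map]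
  rfl

-- ===== VERDICT (by name: the statement is the Claim_ definition above) =====
theorem highest_number_occurrences_spec : Claim_equal_highest_number_occurrences := by
  intro temp _ hpre
  obtain ⟨hne, _⟩ := hpre
  unfold Spec_highest_number_occurrences
  rw [highest_number_occurrences_eq_map, highest_number_occurrences_alt_eq_map]
  refine List.map_congr_left ?_
  intro k _
  have hcolne : temp.map (fun row => PySem.List.pyGetD row (k : Int) 0) ≠ [] := by
    simpa using hne
  simp only []
  rw [pvExtract_eq _ hcolne]
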